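-- pv_equiv track=rewrite | github.com/Ajinoko33/AtCoderEditorialProblems_dev | backend/lambda/search.py | unite_results
-- ===== SOURCE A (Python) =====
-- import copy
--
-- def to_dict(source):
--     # オブジェクトの配列をdict型に変換
--     ret = {}
--     for obj in source:
--         ret[obj["problem_id"]] = obj["result_code"]
--
--     return ret
--
-- def unite_results(problems, user_results):
--     # 問題にユーザのAC状況を合わせる
--     result_codes = to_dict(user_results)
--     ret = []
--     for problem in problems:
--         united_problem = copy.deepcopy(problem)
--         problem_id = united_problem["problem_id"]
--         if problem_id in result_codes:
--             united_problem["result_code"] = result_codes[problem_id]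
--         ret.append(united_problem)
--
--     return ret
-- ===== SOURCE B (Python) =====
-- import copy
--
-- def unite_results(problems, user_results):
--     # Scatter/push approach: deepcopy all problems up front, build an index of
--     # positions by problem_id, then push each user result's code into the
--     # matching positions; later user_results overwrite earlier (last wins).
--     ret = [copy.deepcopy(problem) for problem in problems]
--     positions = {}
--     for i, problem in enumerate(ret):
--         positions.setdefault(problem["problem_id"], []).append(i)
--     for user_result in user_results:
--         for i in positions.get(user_result["problem_id"], []):
--             ret[i]["result_code"] = user_result["result_code"]
--     return ret
-- ===== Notes on version B (the rewrite author's own statement) =====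
-- stated objective: alternative
-- what changed: Inverts the data flow: instead of building an id->code dict and pulling a code per problem, B deepcopies all problems first, builds an index problem_id->positions, then scatters each user result into the matching positions, later entries overwriting earlier ones (last wins).
import Mathlib
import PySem

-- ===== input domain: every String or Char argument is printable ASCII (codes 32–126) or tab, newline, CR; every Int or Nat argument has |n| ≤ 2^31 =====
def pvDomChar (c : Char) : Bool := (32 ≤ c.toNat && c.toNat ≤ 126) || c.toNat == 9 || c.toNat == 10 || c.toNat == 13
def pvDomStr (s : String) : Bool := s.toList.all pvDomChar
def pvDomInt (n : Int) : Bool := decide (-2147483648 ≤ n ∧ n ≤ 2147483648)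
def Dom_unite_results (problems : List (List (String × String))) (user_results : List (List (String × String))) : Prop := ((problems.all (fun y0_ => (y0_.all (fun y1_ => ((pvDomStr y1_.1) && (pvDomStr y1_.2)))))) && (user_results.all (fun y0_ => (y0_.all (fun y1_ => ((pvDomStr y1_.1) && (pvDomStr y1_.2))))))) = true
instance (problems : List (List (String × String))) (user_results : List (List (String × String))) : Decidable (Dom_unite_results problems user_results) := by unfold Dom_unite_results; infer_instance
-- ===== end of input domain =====

-- B inverts the data flow: it deepcopies all problems first, indexes positions by
-- problem_id, and scatters each user result's code into the matching positions
-- (later entries overwrite = last wins); same return value, no speed claim.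


-- ===== PORT A =====
-- to_dict: ret = {}; for obj in source: ret[obj["problem_id"]] = obj["result_code"]
-- (the `getD … ""` defaults are reached only where Python raises KeyError — excluded by Pre_)
def to_dict (source : List (List (String × String))) : PySem.Dict String String :=
  source.foldl (fun ret obj =>
    let o := PySem.Dict.ofList obj
    ret.insert (o.getD "problem_id" "") (o.getD "result_code" "")) PySem.Dict.empty

def unite_results (problems : List (List (String × String))) (user_results : List (List (String × String))) : List (List (String × String)) :=
  let result_codes := to_dict user_results
  let ret : List (List (String × String)) := []
  (problems.foldl (fun ret problem =>
    let united_problem := PySem.Dict.ofList problem   -- deepcopy of the dict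
    let problem_id := united_problem.getD "problem_id" ""
    let united_problem :=
      if result_codes.contains problem_id then
        united_problem.insert "result_code" (result_codes.getD problem_id "")
      else united_problem
    ret ++ [united_problem.items]) ret)

-- ===== PORT B =====
-- ret = [deepcopy(p) for p in problems]
-- positions = {}; for i, p in enumerate(ret): positions.setdefault(p["problem_id"], []).append(i)
-- for ur in user_results: for i in positions.get(ur["problem_id"], []): ret[i]["result_code"] = ur["result_code"]
def unite_results_alt (problems : List (List (String × String))) (user_results : List (List (String × String))) : List (List (String × String)) :=
  let ret : List (PySem.Dict String String) := problems.map PySem.Dict.ofList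
  let positions : PySem.Dict String (List Int) :=
    (PySem.List.enumerate ret).foldl
      (fun pos p => pos.modify ((p.2).getD "problem_id" "") [] (· ++ [p.1]))
      PySem.Dict.empty
  let ret := user_results.foldl (fun ret user_result =>
    let o := PySem.Dict.ofList user_result
    (positions.getD (o.getD "problem_id" "") []).foldl
      (fun ret i =>
        PySem.List.pySetD ret i
          ((PySem.List.pyGetD ret i PySem.Dict.empty).insert "result_code"
            (o.getD "result_code" ""))) ret) ret
  ret.map PySem.Dict.items

-- ===== PRECONDITION & SPEC =====
-- Pre_ excludes exactly the inputs where Python A raises KeyError: a problem without a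
-- "problem_id" key, or a user_result missing "problem_id" or "result_code".
def Pre_unite_results (problems : List (List (String × String))) (user_results : List (List (String × String))) : Prop :=
  (∀ p ∈ problems, "problem_id" ∈ p.map Prod.fst) ∧
  (∀ u ∈ user_results, "problem_id" ∈ u.map Prod.fst ∧ "result_code" ∈ u.map Prod.fst)
instance (problems : List (List (String × String))) (user_results : List (List (String × String))) : Decidable (Pre_unite_results problems user_results) := by unfold Pre_unite_results; infer_instance

def pvWitness_unite_results : (List (List (String × String))) × (List (List (String × String))) :=
  ([[("problem_id", "abc001_a"), ("name", "X")], [("problem_id", "abc001_b")]],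
   [[("problem_id", "abc001_a"), ("result_code", "AC")]])

def Spec_unite_results (problems : List (List (String × String))) (user_results : List (List (String × String))) (out : List (List (String × String))) : Prop := out = unite_results_alt problems user_results
instance (problems : List (List (String × String))) (user_results : List (List (String × String))) (out : List (List (String × String))) : Decidable (Spec_unite_results problems user_results out) := by unfold Spec_unite_results; infer_instance

-- ===== CLAIM (what is proved, stated in full; the proofs are below) =====
def Claim_equal_unite_results : Prop := ∀ (problems : List (List (String × String))) (user_results : List (List (String × String))), Dom_unite_results problems user_results → Pre_unite_results problems user_results → Spec_unite_results problems user_results (unite_results problems user_results)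

-- ===== LEMMAS AND PROOFS =====

theorem innerElem (f : PySem.Dict String String → PySem.Dict String String)
    (hf : ∀ d, f (f d) = f d) (L : List Int) (hL : ∀ i ∈ L, 0 ≤ i)
    (rs : List (PySem.Dict String String)) (j : Nat) :
    (L.foldl (fun rs i =>
        PySem.List.pySetD rs i (f (PySem.List.pyGetD rs i PySem.Dict.empty))) rs)[j]?
      = if (j : Int) ∈ L then rs[j]?.map f else rs[j]? := by
  induction L generalizing rs with
  | nil => simp
  | cons i L ih =>
    have hi : 0 ≤ i := hL i (by simp)
    have hL' : ∀ i ∈ L, 0 ≤ i := fun i h => hL i (by simp [h])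
    simp only [List.foldl_cons]
    rw [PySem.List.pySetD_of_nonneg _ _ hi, ih hL']
    by_cases hk : i.toNat < rs.length
    · have hget : PySem.List.pyGetD rs i PySem.Dict.empty = rs[i.toNat] := by
        rw [PySem.List.pyGetD_eq_getElem _ _ hi (by omega)]
      rw [hget, List.getElem?_set]
      by_cases hij : i.toNat = j
      · subst hij
        have hji : (i.toNat : Int) = i := by omega
        simp only [if_pos hk, List.mem_cons, hji, true_or, if_pos]
        by_cases hjL : i ∈ L
        · simp [hjL, hf, List.getElem?_eq_getElem hk]
        · simp [hjL, List.getElem?_eq_getElem hk]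
      · have hji : ¬ ((j : Int) = i) := by omega
        simp only [if_neg hij, List.mem_cons, hji, false_or]
    · rw [List.set_eq_of_length_le (by omega)]
      by_cases hji : (j : Int) = i
      · have hjlen : rs.length ≤ j := by omega
        have : rs[j]? = none := by simp [List.getElem?_eq_none_iff.mpr hjlen]
        simp [this, List.mem_cons]
      · simp only [List.mem_cons, hji, false_or]

-- positions.getD characterization: indices of problems with the given id, in order
theorem positions_getD (ret0 : List (PySem.Dict String String)) (x : String) :
    ((PySem.List.enumerate ret0).foldl
        (fun pos p => pos.modify ((p.2).getD "problem_id" "") [] (· ++ [p.1]))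
        PySem.Dict.empty).getD x []
      = ((PySem.List.enumerate ret0).filter
          (fun p => (p.2).getD "problem_id" "" == x)).map (·.1) := by
  have h := PySem.Dict.getD_foldl_modify_append
    ((PySem.List.enumerate ret0).map (fun p => ((p.2).getD "problem_id" "", p.1)))
    (PySem.Dict.empty (κ := String) (ν := List Int)) x
  rw [List.foldl_map] at h
  simp only [h, PySem.Dict.getD_empty, List.nil_append, List.filter_map, List.map_map]
  rfl

theorem mem_positions (ret0 : List (PySem.Dict String String)) (x : String) (i : Int) :
    i ∈ ((PySem.List.enumerate ret0).foldl
        (fun pos p => pos.modify ((p.2).getD "problem_id" "") [] (· ++ [p.1]))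
        PySem.Dict.empty).getD x []
      ↔ ∃ (k : Nat) (h : k < ret0.length), i = (k : Int) ∧ ret0[k].getD "problem_id" "" = x := by
  rw [positions_getD]
  simp only [List.mem_map, List.mem_filter, PySem.List.mem_enumerate_iff]
  constructor
  · rintro ⟨p, ⟨⟨k, hk, rfl⟩, hid⟩, rfl⟩
    refine ⟨k, hk, by ring, ?_⟩
    simpa using hid
  · rintro ⟨k, hk, rfl, hid⟩
    exact ⟨((0 : Int) + k, ret0[k]), ⟨⟨k, hk, rfl⟩, by simpa using hid⟩, by ring⟩

-- element j through the whole scatter loop over user_results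
theorem outerElem (P : String → List Int) (hP : ∀ x i, i ∈ P x → 0 ≤ i)
    (us : List (List (String × String))) (rs : List (PySem.Dict String String)) (j : Nat) :
    ((us.foldl (fun ret user_result =>
        let o := PySem.Dict.ofList user_result
        (P (o.getD "problem_id" "")).foldl
          (fun ret i =>
            PySem.List.pySetD ret i
              ((PySem.List.pyGetD ret i PySem.Dict.empty).insert "result_code"
                (o.getD "result_code" ""))) ret) rs)[j]?)
      = us.foldl (fun acc user_result =>
          let o := PySem.Dict.ofList user_result
          if (j : Int) ∈ P (o.getD "problem_id" "") then
            acc.map (·.insert "result_code" (o.getD "result_code" ""))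
          else acc) rs[j]? := by
  induction us generalizing rs with
  | nil => rfl
  | cons u us ih =>
    simp only [List.foldl_cons]
    rw [ih]
    rw [innerElem (fun d => d.insert "result_code" ((PySem.Dict.ofList u).getD "result_code" ""))
      (fun d => PySem.Dict.insert_insert_self d _ _ _)
      (P ((PySem.Dict.ofList u).getD "problem_id" ""))
      (fun i h => hP _ i h) rs j]

-- option-level accumulator fold = map of the dict-level fold
theorem foldl_option_map (us : List (List (String × String)))
    (c : List (String × String) → Prop) [DecidablePred c]
    (g : List (String × String) → PySem.Dict String String → PySem.Dict String String)
    (o : Option (PySem.Dict String String)) :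
    us.foldl (fun acc u => if c u then acc.map (g u) else acc) o
      = o.map (fun d => us.foldl (fun d u => if c u then g u d else d) d) := by
  induction us generalizing o with
  | nil => cases o <;> rfl
  | cons u us ih =>
    simp only [List.foldl_cons]
    by_cases hc : c u
    · simp only [if_pos hc, ih, Option.map_map]; rfl
    · simp only [if_neg hc, ih]

-- last matching user_result wins
theorem foldl_if_insert_eq_find (c : List (String × String) → Bool)
    (g : List (String × String) → String)
    (us : List (List (String × String))) (d : PySem.Dict String String) :
    us.foldl (fun d u => if c u then d.insert "result_code" (g u) else d) d
      = match us.reverse.find? c with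
        | some u => d.insert "result_code" (g u)
        | none => d := by
  induction us generalizing d with
  | nil => rfl
  | cons u us ih =>
    simp only [List.foldl_cons, List.reverse_cons, List.find?_append]
    rw [ih]
    cases h : us.reverse.find? c with
    | some v =>
      simp only [Option.some_or]
      by_cases hc : c u
      · rw [if_pos hc, PySem.Dict.insert_insert_self]
      · rw [if_neg hc]
    | none =>
      simp only [Option.none_or, List.find?_cons, List.find?_nil]
      by_cases hc : c u
      · simp [hc]
      · simp [hc]

-- A's dict answers get? by the LAST matching user_result
theorem get?_to_dict_loop (us : List (List (String × String)))
    (d : PySem.Dict String String) (x : String) :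
    (us.foldl (fun ret obj =>
      let o := PySem.Dict.ofList obj
      ret.insert (o.getD "problem_id" "") (o.getD "result_code" "")) d).get? x =
    match us.reverse.find? (fun u => (PySem.Dict.ofList u).getD "problem_id" "" == x) with
    | some u => some ((PySem.Dict.ofList u).getD "result_code" "")
    | none => d.get? x := by
  induction us generalizing d with
  | nil => simp
  | cons u us ih =>
    simp only [List.foldl_cons, List.reverse_cons, List.find?_append, ih]
    cases h : us.reverse.find? (fun u => (PySem.Dict.ofList u).getD "problem_id" "" == x) with
    | some v => rfl
    | none =>
      simp only [Option.none_or, List.find?_cons, List.find?_nil]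
      by_cases he : (PySem.Dict.ofList u).getD "problem_id" "" = x
      · simp [he, PySem.Dict.get?_insert_self]
      · simp [PySem.Dict.get?_insert_of_ne _ _ (Ne.symm he), beq_eq_false_iff_ne.mpr he]

theorem unite_results_eq_alt (problems user_results : List (List (String × String))) :
    unite_results problems user_results = unite_results_alt problems user_results := by
  unfold unite_results unite_results_alt
  rw [PySem.List.foldl_append_singleton_eq_map, List.nil_append]
  set ret0 : List (PySem.Dict String String) := problems.map PySem.Dict.ofList with hret0
  set positions : PySem.Dict String (List Int) :=
    (PySem.List.enumerate ret0).foldl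
      (fun pos p => pos.modify ((p.2).getD "problem_id" "") [] (· ++ [p.1]))
      PySem.Dict.empty with hpos
  have hP : ∀ x i, i ∈ positions.getD x [] → 0 ≤ i := by
    intro x i h
    rw [hpos, mem_positions] at h
    obtain ⟨k, _, rfl, _⟩ := h
    positivity
  apply List.ext_getElem?
  intro j
  rw [List.getElem?_map, List.getElem?_map,
    outerElem (fun x => positions.getD x []) hP user_results ret0 j,
    List.getElem?_map,
    foldl_option_map user_results
      (fun u => (j : Int) ∈ positions.getD ((PySem.Dict.ofList u).getD "problem_id" "") [])
      (fun u d => d.insert "result_code" ((PySem.Dict.ofList u).getD "result_code" "")),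
    Option.map_map]
  cases hj : problems[j]? with
  | none => rfl
  | some p =>
    have hjlen : j < problems.length := (List.getElem?_eq_some_iff.mp hj).1
    have hpj : problems[j] = p := (List.getElem?_eq_some_iff.mp hj).2
    simp only [Option.map_some, Function.comp]
    have hcond : ∀ x, ((j : Int) ∈ positions.getD x [])
        ↔ (((PySem.Dict.ofList p).getD "problem_id" "" == x) = true) := by
      intro x
      rw [hpos, mem_positions]
      constructor
      · rintro ⟨k, hk, hjk, hid⟩
        have : k = j := by omega
        subst this
        simp only [hret0, List.getElem_map, hpj] at hid
        simpa using hid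
      · intro h
        refine ⟨j, by simpa [hret0] using hjlen, rfl, ?_⟩
        simp only [hret0, List.getElem_map, hpj]
        simpa using h
    have hfe : (fun (d : PySem.Dict String String) u =>
        if (j : Int) ∈ positions.getD ((PySem.Dict.ofList u).getD "problem_id" "") [] then
          d.insert "result_code" ((PySem.Dict.ofList u).getD "result_code" "")
        else d)
      = (fun (d : PySem.Dict String String) u =>
        if ((PySem.Dict.ofList u).getD "problem_id" ""
            == (PySem.Dict.ofList p).getD "problem_id" "") then
          d.insert "result_code" ((PySem.Dict.ofList u).getD "result_code" "")
        else d) := by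
      funext d u
      exact if_congr ((hcond _).trans (by simp only [beq_iff_eq]; exact eq_comm)) rfl rfl
    rw [hfe, foldl_if_insert_eq_find
      (fun u => (PySem.Dict.ofList u).getD "problem_id" "" == (PySem.Dict.ofList p).getD "problem_id" "")
      (fun u => (PySem.Dict.ofList u).getD "result_code" "") user_results (PySem.Dict.ofList p)]
    rw [PySem.Dict.contains_eq_isSome_get?,
      PySem.Dict.getD_eq_get?_getD (to_dict user_results)]
    unfold to_dict
    rw [get?_to_dict_loop]
    cases h : user_results.reverse.find?
        (fun u => (PySem.Dict.ofList u).getD "problem_id" "" == (PySem.Dict.ofList p).getD "problem_id" "") with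
    | some u => rfl
    | none => simp [PySem.Dict.get?_empty]

-- ===== VERDICT (by name: the statement is the Claim_ definition above) =====
theorem unite_results_spec : Claim_equal_unite_results := by
  intro problems user_results _ _
  unfold Spec_unite_results
  exact unite_results_eq_alt problems user_results
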